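-- pv_equiv track=rewrite | github.com/Bogdy09/PythonProjects | DynamicAndBacktracking/a4_2_naive.py | find_maximum_snake_sequence
-- ===== SOURCE A (Python) =====
-- def find_snake_sequence_naive(matrix, i, j, current_sequence):
--     n = len(matrix)
--
--     # If the current cell (i, j) is out of bounds, return the current sequence.
--     if i < 0 or i >= n or j < 0 or j >= n:
--         return current_sequence
--
--     current_value = matrix[i][j]
--
--     # Check if the current sequence is empty or if the current value can be part of the sequence.
--     if not current_sequence or abs(current_value - current_sequence[-1][0]) == 1:
--         current_sequence.append((current_value, (i, j)))
--
--         # Explore two possible directions: right and down.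
--         right_sequence = find_snake_sequence_naive(matrix, i, j + 1, current_sequence.copy())
--         down_sequence = find_snake_sequence_naive(matrix, i + 1, j, current_sequence.copy())
--
--         # Return the longer sequence of the two.
--         if len(right_sequence) > len(down_sequence):
--             return right_sequence
--         else:
--             return down_sequence
--
--     return current_sequence
--
-- def find_maximum_snake_sequence(matrix):
--     n = len(matrix)
--     max_sequence = []
--
--     # Iterate through all cells in the matrix as potential starting points for snake sequences.
--     for i in range(n):
--         for j in range(n):
--             snake_sequence = find_snake_sequence_naive(matrix, i, j, [])
--             if len(snake_sequence) > len(max_sequence):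
--                 max_sequence = snake_sequence
--
--     return max_sequence
-- ===== SOURCE B (Python) =====
-- def find_maximum_snake_sequence(matrix):
--     # Bottom-up DP: each cell (i, j) holds the longest snake starting at (i, j),
--     # computed once (right preferred only when strictly longer, i.e. the same
--     # down-over-right tie-break); then scan starts in row-major order keeping
--     # the first strictly longest, i.e. the earliest start.
--     n = len(matrix)
--     grid = []          # dp rows for i..n-1, grid[0] is row i of the current pass
--     below = []         # dp row for i+1 (empty list on the bottom row)
--     for i in range(n - 1, -1, -1):
--         row = []       # dp entries for columns j..n-1, row[0] is column j+1
--         for j in range(n - 1, -1, -1):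
--             v = matrix[i][j]
--             right = row[0] if row and abs(matrix[i][j + 1] - v) == 1 else []
--             down = below[j] if below and abs(matrix[i + 1][j] - v) == 1 else []
--             cont = right if len(right) > len(down) else down
--             row.insert(0, [(v, (i, j))] + cont)
--         grid.insert(0, row)
--         below = row
--     best = []
--     for row in grid:
--         for s in row:
--             if len(s) > len(best):
--                 best = s
--     return best
-- ===== Notes on version B (the rewrite author's own statement) =====
-- stated objective: alternative
-- what changed: Replaces the per-start two-way recursion (which re-explores cells and can blow up on matrices dense in |diff|=1 neighbours) by a bottom-up dynamic program that computes each cell's longest snake once, with the same down-over-right and earliest-start tie-breaks.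
import Mathlib
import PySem

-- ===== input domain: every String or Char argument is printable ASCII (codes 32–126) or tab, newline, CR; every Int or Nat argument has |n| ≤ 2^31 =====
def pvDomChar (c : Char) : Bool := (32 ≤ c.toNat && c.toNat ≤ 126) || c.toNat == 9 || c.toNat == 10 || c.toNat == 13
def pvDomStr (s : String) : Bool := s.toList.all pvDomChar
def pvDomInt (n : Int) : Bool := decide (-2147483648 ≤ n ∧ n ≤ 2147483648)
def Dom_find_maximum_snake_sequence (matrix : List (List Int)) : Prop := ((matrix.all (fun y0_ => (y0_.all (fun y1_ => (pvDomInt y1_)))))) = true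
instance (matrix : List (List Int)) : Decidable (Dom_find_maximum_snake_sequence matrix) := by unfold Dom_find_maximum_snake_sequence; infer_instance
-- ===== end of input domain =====

-- B replaces A's per-start two-way recursion by a bottom-up dynamic program over
-- the cells with the same down-over-right and earliest-start tie-breaks.

-- ===== PORT A =====
-- matrix[i][j]; under Pre_ every index used is in range, so the getD default is never returned
def pvCell (matrix : List (List Int)) (i j : Nat) : Int := (matrix.getD i []).getD j 0

-- the condition `not current_sequence or abs(current_value - current_sequence[-1][0]) == 1`
def pvOkB (cur : List (Int × (Int × Int))) (v : Int) : Bool :=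
  cur.isEmpty || (match cur.getLast? with
    | some (lv, _) => (v - lv).natAbs == 1
    | none => false)

def find_snake_sequence_naive (matrix : List (List Int)) (i j : Int)
    (cur : List (Int × (Int × Int))) : List (Int × (Int × Int)) :=
  if _h : i < 0 ∨ (matrix.length : Int) ≤ i ∨ j < 0 ∨ (matrix.length : Int) ≤ j then cur
  else
    let v := pvCell matrix i.toNat j.toNat
    if pvOkB cur v then
      let r := find_snake_sequence_naive matrix i (j + 1) (cur ++ [(v, (i, j))])
      let d := find_snake_sequence_naive matrix (i + 1) j (cur ++ [(v, (i, j))])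
      if d.length < r.length then r else d
    else cur
termination_by (2 * (matrix.length : Int) - i - j).toNat
decreasing_by all_goals omega

def find_maximum_snake_sequence (matrix : List (List Int)) : List (Int × (Int × Int)) :=
  (List.range matrix.length).foldl (fun maxSeq (i : Nat) =>
    (List.range matrix.length).foldl (fun maxSeq (j : Nat) =>
      let s := find_snake_sequence_naive matrix (i : Int) (j : Int) []
      if maxSeq.length < s.length then s else maxSeq) maxSeq) []

-- ===== PORT B =====
-- inner loop of Source B: dp entries for columns j..n-1 of row i (row[0] is the entry for column j+1)
def pvAltRow (matrix : List (List Int)) (below : List (List (Int × (Int × Int))))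
    (i n j : Nat) : List (List (Int × (Int × Int))) :=
  if _h : j < n then
    let rest := pvAltRow matrix below i n (j + 1)
    let v := pvCell matrix i j
    let right := match rest with
      | rnext :: _ => if (pvCell matrix i (j + 1) - v).natAbs == 1 then rnext else []
      | [] => []
    let down := match below with
      | [] => []
      | _ :: _ => if (pvCell matrix (i + 1) j - v).natAbs == 1 then below.getD j [] else []
    ((v, ((i : Int), (j : Int))) :: (if down.length < right.length then right else down)) :: rest
  else []
termination_by n - j

-- outer loop of Source B: dp rows for i..n-1; `below` is the head of the rows already built
def pvAltGrid (matrix : List (List Int)) (n i : Nat) :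
    List (List (List (Int × (Int × Int)))) :=
  if _h : i < n then
    let rest := pvAltGrid matrix n (i + 1)
    pvAltRow matrix (rest.headD []) i n 0 :: rest
  else []
termination_by n - i

def find_maximum_snake_sequence_alt (matrix : List (List Int)) : List (Int × (Int × Int)) :=
  (pvAltGrid matrix matrix.length 0).foldl
    (fun best row => row.foldl
      (fun best s => if best.length < s.length then s else best) best) []

-- ===== PRECONDITION & SPEC =====
-- Pre_ excludes exactly the matrices with a row shorter than len(matrix), on which
-- Python A (and Python B) raises IndexError.
def Pre_find_maximum_snake_sequence (matrix : List (List Int)) : Prop :=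
  ∀ row ∈ matrix, matrix.length ≤ row.length
instance (matrix : List (List Int)) : Decidable (Pre_find_maximum_snake_sequence matrix) := by
  unfold Pre_find_maximum_snake_sequence; infer_instance

def pvWitness_find_maximum_snake_sequence : List (List Int) := [[1, 2], [4, 3]]

def Spec_find_maximum_snake_sequence (matrix : List (List Int)) (out : List (Int × (Int × Int))) : Prop := out = find_maximum_snake_sequence_alt matrix
instance (matrix : List (List Int)) (out : List (Int × (Int × Int))) : Decidable (Spec_find_maximum_snake_sequence matrix out) := by unfold Spec_find_maximum_snake_sequence; infer_instance

-- ===== CLAIM (what is proved, stated in full; the proofs are below) =====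
def Claim_equal_find_maximum_snake_sequence : Prop := ∀ (matrix : List (List Int)), Dom_find_maximum_snake_sequence matrix → Pre_find_maximum_snake_sequence matrix → Spec_find_maximum_snake_sequence matrix (find_maximum_snake_sequence matrix)

-- ===== LEMMAS AND PROOFS =====

-- the longest snake starting at cell (i, j): the compositional characterisation both ports compute
def pvPath (matrix : List (List Int)) (n i j : Nat) : List (Int × (Int × Int)) :=
  if h : i < n ∧ j < n then
    let v := pvCell matrix i j
    let r := if j + 1 < n ∧ (pvCell matrix i (j + 1) - v).natAbs = 1
             then pvPath matrix n i (j + 1) else []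
    let d := if i + 1 < n ∧ (pvCell matrix (i + 1) j - v).natAbs = 1
             then pvPath matrix n (i + 1) j else []
    (v, ((i : Int), (j : Int))) :: (if d.length < r.length then r else d)
  else []
termination_by (n - i) + (n - j)
decreasing_by all_goals omega

theorem map_range'_getD {α : Type} (f : Nat → α) (n j : Nat) (d : α) (h : j < n) :
    ((List.range' 0 n).map f).getD j d = f j := by
  have hlen : j < ((List.range' 0 n).map f).length := by simpa using h
  rw [List.getD_eq_getElem _ _ hlen]
  simp

theorem pvRow_eq (matrix : List (List Int)) (n i : Nat) (hi : i < n)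
    (below : List (List (Int × (Int × Int))))
    (hb : below = if i + 1 < n then (List.range' 0 n).map (pvPath matrix n (i + 1)) else []) :
    ∀ k j, n - j ≤ k →
      pvAltRow matrix below i n j = (List.range' j (n - j)).map (pvPath matrix n i) := by
  intro k
  induction k with
  | zero =>
    intro j hk
    have hj : ¬ j < n := by omega
    rw [pvAltRow.eq_def, dif_neg hj]
    have h0 : n - j = 0 := by omega
    rw [h0]
    simp
  | succ k ih =>
    intro j hk
    by_cases hj : j < n
    · rw [pvAltRow.eq_def, dif_pos hj]
      have hrest : pvAltRow matrix below i n (j + 1)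
          = (List.range' (j + 1) (n - (j + 1))).map (pvPath matrix n i) := ih (j + 1) (by omega)
      have hnj : n - j = (n - (j + 1)) + 1 := by omega
      rw [hnj, List.range'_succ, List.map_cons]
      simp only [hrest]
      have hright : ∀ (rs : List (List (Int × (Int × Int)))),
          rs = (List.range' (j + 1) (n - (j + 1))).map (pvPath matrix n i) →
          (match rs with
            | rnext :: _ => if (pvCell matrix i (j + 1) - pvCell matrix i j).natAbs == 1 then rnext else []
            | [] => []) =
          (if j + 1 < n ∧ (pvCell matrix i (j + 1) - pvCell matrix i j).natAbs = 1
           then pvPath matrix n i (j + 1) else []) := by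
        intro rs hrs
        by_cases hj1 : j + 1 < n
        · have h1 : n - (j + 1) = (n - (j + 2)) + 1 := by omega
          rw [h1, List.range'_succ, List.map_cons] at hrs
          subst hrs
          by_cases hd : (pvCell matrix i (j + 1) - pvCell matrix i j).natAbs = 1 <;>
            simp [hd, hj1]
        · have h1 : n - (j + 1) = 0 := by omega
          rw [h1] at hrs
          simp at hrs
          subst hrs
          simp [hj1]
      have hdown : ∀ (bl : List (List (Int × (Int × Int)))),
          bl = (if i + 1 < n then (List.range' 0 n).map (pvPath matrix n (i + 1)) else []) →
          (match bl with
            | [] => []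
            | _ :: _ => if (pvCell matrix (i + 1) j - pvCell matrix i j).natAbs == 1
                        then bl.getD j [] else []) =
          (if i + 1 < n ∧ (pvCell matrix (i + 1) j - pvCell matrix i j).natAbs = 1
           then pvPath matrix n (i + 1) j else []) := by
        intro bl hbl
        by_cases hi1 : i + 1 < n
        · rw [if_pos hi1] at hbl
          have hgetD : bl.getD j [] = pvPath matrix n (i + 1) j := by
            rw [hbl]; exact map_range'_getD _ _ _ _ hj
          rcases hbl2 : bl with _ | ⟨b0, bs⟩
          · exfalso
            rw [hbl2] at hbl
            have hn1 : n = (n - 1) + 1 := by omega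
            rw [hn1, List.range'_succ, List.map_cons] at hbl
            simp at hbl
          · rw [List.getD_eq_getElem?_getD] at hgetD
            by_cases hd : (pvCell matrix (i + 1) j - pvCell matrix i j).natAbs = 1 <;>
              simp [hd, hi1, ← hbl2, hgetD]
        · rw [if_neg hi1] at hbl
          subst hbl
          simp [hi1]
      simp only [hright _ rfl, hdown _ hb]
      conv_rhs => rw [pvPath]
      rw [dif_pos ⟨hi, hj⟩]
    · rw [pvAltRow.eq_def, dif_neg hj]
      have h0 : n - j = 0 := by omega
      rw [h0]
      simp

theorem pvGrid_eq (matrix : List (List Int)) (n : Nat) :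
    ∀ k i, n - i ≤ k →
      pvAltGrid matrix n i
        = (List.range' i (n - i)).map (fun i' => (List.range' 0 n).map (pvPath matrix n i')) := by
  intro k
  induction k with
  | zero =>
    intro i hk
    have hi : ¬ i < n := by omega
    rw [pvAltGrid.eq_def, dif_neg hi]
    have h0 : n - i = 0 := by omega
    rw [h0]; simp
  | succ k ih =>
    intro i hk
    by_cases hi : i < n
    · rw [pvAltGrid.eq_def, dif_pos hi]
      have hrest := ih (i + 1) (by omega)
      simp only [hrest]
      have hhead : ((List.range' (i + 1) (n - (i + 1))).map
            (fun i' => (List.range' 0 n).map (pvPath matrix n i'))).headD []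
          = (if i + 1 < n then (List.range' 0 n).map (pvPath matrix n (i + 1)) else []) := by
        by_cases hi1 : i + 1 < n
        · have h1 : n - (i + 1) = (n - (i + 2)) + 1 := by omega
          rw [h1, List.range'_succ, List.map_cons]
          simp [hi1]
        · have h1 : n - (i + 1) = 0 := by omega
          rw [h1]
          simp [hi1]
      rw [hhead, pvRow_eq matrix n i hi _ rfl n 0 (by omega)]
      have hni : n - i = (n - (i + 1)) + 1 := by omega
      rw [hni, List.range'_succ, List.map_cons]
      simp
    · rw [pvAltGrid.eq_def, dif_neg hi]
      have h0 : n - i = 0 := by omega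
      rw [h0]; simp

theorem pvOkB_concat (cur : List (Int × (Int × Int))) (v w : Int) (p : Int × Int) :
    pvOkB (cur ++ [(v, p)]) w = ((w - v).natAbs == 1) := by
  simp [pvOkB]

theorem pvSnake_eq (matrix : List (List Int)) :
    ∀ k (i j : Nat) (cur : List (Int × (Int × Int))),
      (matrix.length - i) + (matrix.length - j) ≤ k →
      find_snake_sequence_naive matrix (i : Int) (j : Int) cur =
        if i < matrix.length ∧ j < matrix.length then
          (if pvOkB cur (pvCell matrix i j) then cur ++ pvPath matrix matrix.length i j else cur)
        else cur := by
  intro k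
  induction k with
  | zero =>
    intro i j cur hk
    have hi : ¬ (i < matrix.length ∧ j < matrix.length) := by omega
    rw [find_snake_sequence_naive, dif_pos (by omega), if_neg hi]
  | succ k ih =>
    intro i j cur hk
    by_cases hb : i < matrix.length ∧ j < matrix.length
    · obtain ⟨hi, hj⟩ := hb
      rw [find_snake_sequence_naive, dif_neg (by omega)]
      rw [if_pos (show i < matrix.length ∧ j < matrix.length from ⟨hi, hj⟩)]
      simp only [Int.toNat_natCast]
      by_cases hok : pvOkB cur (pvCell matrix i j)
      · simp only [hok, if_true]
        set v := pvCell matrix i j with hv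
        set cur2 := cur ++ [(v, ((i : Int), (j : Int)))] with hcur2
        have hr : find_snake_sequence_naive matrix (i : Int) ((j : Int) + 1) cur2
            = cur2 ++ (if j + 1 < matrix.length ∧ (pvCell matrix i (j + 1) - v).natAbs = 1
                       then pvPath matrix matrix.length i (j + 1) else []) := by
          have hcast : ((j : Int) + 1) = ((j + 1 : Nat) : Int) := by push_cast; ring
          rw [hcast, ih i (j + 1) cur2 (by omega)]
          rw [pvOkB_concat]
          by_cases hj1 : j + 1 < matrix.length
          · by_cases hd : (pvCell matrix i (j + 1) - v).natAbs = 1 <;>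
              simp [hi, hj1, hd]
          · simp [hj1]
        have hd : find_snake_sequence_naive matrix ((i : Int) + 1) (j : Int) cur2
            = cur2 ++ (if i + 1 < matrix.length ∧ (pvCell matrix (i + 1) j - v).natAbs = 1
                       then pvPath matrix matrix.length (i + 1) j else []) := by
          have hcast : ((i : Int) + 1) = ((i + 1 : Nat) : Int) := by push_cast; ring
          rw [hcast, ih (i + 1) j cur2 (by omega)]
          rw [pvOkB_concat]
          by_cases hi1 : i + 1 < matrix.length
          · by_cases hdd : (pvCell matrix (i + 1) j - v).natAbs = 1 <;>
              simp [hj, hi1, hdd]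
          · simp [hi1]
        simp only [hr, hd]
        have hpath : pvPath matrix matrix.length i j
            = (v, ((i : Int), (j : Int))) ::
              (if (if i + 1 < matrix.length ∧ (pvCell matrix (i + 1) j - v).natAbs = 1
                   then pvPath matrix matrix.length (i + 1) j else []).length
                < (if j + 1 < matrix.length ∧ (pvCell matrix i (j + 1) - v).natAbs = 1
                   then pvPath matrix matrix.length i (j + 1) else []).length
               then (if j + 1 < matrix.length ∧ (pvCell matrix i (j + 1) - v).natAbs = 1
                     then pvPath matrix matrix.length i (j + 1) else [])
               else (if i + 1 < matrix.length ∧ (pvCell matrix (i + 1) j - v).natAbs = 1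
                     then pvPath matrix matrix.length (i + 1) j else [])) := by
          conv_lhs => rw [pvPath]
          rw [dif_pos (show i < matrix.length ∧ j < matrix.length from ⟨hi, hj⟩)]
        rw [hpath]
        generalize (if j + 1 < matrix.length ∧ (pvCell matrix i (j + 1) - v).natAbs = 1
            then pvPath matrix matrix.length i (j + 1) else []) = R
        generalize (if i + 1 < matrix.length ∧ (pvCell matrix (i + 1) j - v).natAbs = 1
            then pvPath matrix matrix.length (i + 1) j else []) = D
        rw [hcur2]
        by_cases hcmp : D.length < R.length
        · rw [if_pos (show (cur ++ [(v, ((i : Int), (j : Int)))] ++ D).length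
              < (cur ++ [(v, ((i : Int), (j : Int)))] ++ R).length by simp [hcmp]), if_pos hcmp]
          simp
        · rw [if_neg (show ¬ (cur ++ [(v, ((i : Int), (j : Int)))] ++ D).length
              < (cur ++ [(v, ((i : Int), (j : Int)))] ++ R).length by simp [hcmp]), if_neg hcmp]
          simp
      · simp only [Bool.not_eq_true] at hok
        simp only [hok, Bool.false_eq_true, if_false]
    · rw [find_snake_sequence_naive, dif_pos (by omega), if_neg hb]

theorem pvSnake_path (matrix : List (List Int)) (i j : Nat)
    (hi : i < matrix.length) (hj : j < matrix.length) :
    find_snake_sequence_naive matrix (i : Int) (j : Int) []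
      = pvPath matrix matrix.length i j := by
  rw [pvSnake_eq matrix ((matrix.length - i) + (matrix.length - j)) i j [] le_rfl]
  rw [if_pos ⟨hi, hj⟩]
  have hok : pvOkB [] (pvCell matrix i j) = true := by simp [pvOkB]
  rw [if_pos hok]
  simp

theorem final_eq (matrix : List (List Int)) :
    find_maximum_snake_sequence matrix = find_maximum_snake_sequence_alt matrix := by
  unfold find_maximum_snake_sequence find_maximum_snake_sequence_alt
  rw [pvGrid_eq matrix matrix.length matrix.length 0 (by omega)]
  simp only [Nat.sub_zero, List.foldl_map, ← List.range_eq_range']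
  apply PySem.List.foldl_congr_mem
  intro acc i hi
  apply PySem.List.foldl_congr_mem
  intro acc2 j hj
  rw [List.mem_range] at hi hj
  simp only [pvSnake_path matrix i j hi hj]

-- ===== VERDICT (by name: the statement is the Claim_ definition above) =====
theorem find_maximum_snake_sequence_spec : Claim_equal_find_maximum_snake_sequence := by
  intro matrix _ _
  unfold Spec_find_maximum_snake_sequence
  exact final_eq matrix
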